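-- pv_equiv track=rewrite | github.com/JoHyukJun/algorithm-analysis | src/python/등수 매기기.py | solution
-- ===== SOURCE A (Python) =====
-- def solution(score):
--     answer = [0 for i in range(len(score))]
--     rank = {}
--
--     for idx, s in enumerate(score):
--         tot = s[0] + s[1]
--
--         if tot in rank:
--             rank[tot] += 1
--         else:
--             rank[tot] = 1
--
--     rank = sorted(rank.items(), reverse=True)
--     cur_rank = 1
--
--     for i in range(len(rank)):
--         for j in range(len(score)):
--             tot = score[j][0] + score[j][1]
--
--             if rank[i][0] == tot:
--                 answer[j] += cur_rank
--
--         cur_rank += rank[i][1]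
--
--     return answer
-- ===== SOURCE B (Python) =====
-- def solution(score):
--     totals = [s[0] + s[1] for s in score]
--     counts = {}
--     for t in totals:
--         counts[t] = counts.get(t, 0) + 1
--     rank = {}
--     acc = 1
--     for t, c in sorted(counts.items(), reverse=True):
--         rank[t] = acc
--         acc += c
--     return [rank[t] for t in totals]
-- ===== Notes on version B (the rewrite author's own statement) =====
-- stated objective: alternative
-- what changed: Replaces A's nested scan (for every distinct total, rescan all contestants and add the current rank into the answer array) by a rank dictionary built once over the sorted distinct totals, so the answer is a single map lookup per contestant.
import Mathlib
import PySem

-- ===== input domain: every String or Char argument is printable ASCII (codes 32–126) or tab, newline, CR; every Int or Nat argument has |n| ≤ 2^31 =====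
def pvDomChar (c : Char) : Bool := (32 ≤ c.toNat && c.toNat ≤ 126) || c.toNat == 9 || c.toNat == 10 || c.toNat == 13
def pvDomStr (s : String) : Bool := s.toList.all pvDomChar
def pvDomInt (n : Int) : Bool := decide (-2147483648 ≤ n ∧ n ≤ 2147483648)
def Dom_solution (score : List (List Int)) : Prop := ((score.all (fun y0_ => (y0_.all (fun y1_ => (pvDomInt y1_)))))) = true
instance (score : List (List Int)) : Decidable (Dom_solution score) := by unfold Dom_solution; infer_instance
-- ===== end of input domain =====

-- B replaces A's nested per-distinct-total rescan of all contestants by a rank dictionary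
-- built once over the sorted distinct totals, one lookup per contestant (alternative algorithm).

-- ===== PORT A =====
def solution (score : List (List Int)) : List Int :=
  let answer := (PySem.List.pyRange 0 (score.length : Int)).map (fun _ => (0 : Int))
  let rank : PySem.Dict Int Int := score.foldl (fun r s =>
      let tot := PySem.List.pyGetD s 0 0 + PySem.List.pyGetD s 1 0
      if r.contains tot then r.insert tot (r.getD tot 0 + 1)
      else r.insert tot 1) PySem.Dict.empty
  let rankL := PySem.List.sorted2 rank.items (fun p => p.1) (fun p => p.2) true
  let st := rankL.foldl (fun (st : List Int × Int) p =>
      let answer := (PySem.List.pyRange 0 (score.length : Int)).foldl (fun ans j =>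
          let tot := PySem.List.pyGetD (PySem.List.pyGetD score j []) 0 0 + PySem.List.pyGetD (PySem.List.pyGetD score j []) 1 0
          if p.1 = tot then PySem.List.pySetD ans j (PySem.List.pyGetD ans j 0 + st.2) else ans)
        st.1
      (answer, st.2 + p.2)) (answer, 1)
  st.1

-- ===== PORT B =====
def solution_alt (score : List (List Int)) : List Int :=
  let totals := score.map (fun s => PySem.List.pyGetD s 0 0 + PySem.List.pyGetD s 1 0)
  let counts : PySem.Dict Int Int :=
    totals.foldl (fun d t => d.insert t (d.getD t 0 + 1)) PySem.Dict.empty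
  let st := (PySem.List.sorted2 counts.items (fun p => p.1) (fun p => p.2) true).foldl
      (fun (st : PySem.Dict Int Int × Int) p => (st.1.insert p.1 st.2, st.2 + p.2))
      (PySem.Dict.empty, 1)
  totals.map (fun t => st.1.getD t 0)

-- ===== PRECONDITION & SPEC =====
-- Pre_ excludes exactly the inputs where Python A raises IndexError: a row with fewer than two scores.
def Pre_solution (score : List (List Int)) : Prop := ∀ s ∈ score, 2 ≤ s.length
instance (score : List (List Int)) : Decidable (Pre_solution score) := by unfold Pre_solution; infer_instance
def pvWitness_solution : List (List Int) := [[1, 2], [3, 4], [3, 2]]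
def Spec_solution (score : List (List Int)) (out : List Int) : Prop := out = solution_alt score
instance (score : List (List Int)) (out : List Int) : Decidable (Spec_solution score out) := by unfold Spec_solution; infer_instance

-- ===== CLAIM (what is proved, stated in full; the proofs are below) =====
def Claim_equal_solution : Prop := ∀ (score : List (List Int)), Dom_solution score → Pre_solution score → Spec_solution score (solution score)

-- ===== LEMMAS AND PROOFS =====

-- the rank a total t receives from A's outer loop over the distinct (total, count) list
def rk : List (Int × Int) → Int → Int → Int
  | [], _, _ => 0
  | p :: rest, cur, t => (if p.1 = t then cur else 0) + rk rest (cur + p.2) t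

theorem rk_not_mem (L : List (Int × Int)) (cur t : Int) (h : t ∉ L.map Prod.fst) :
    rk L cur t = 0 := by
  induction L generalizing cur with
  | nil => rfl
  | cons p rest ih =>
    simp only [List.map_cons, List.mem_cons, not_or] at h
    simp [rk, Ne.symm h.1, ih _ h.2]

theorem zipWith_zipWith (g h : Int → List Int → Int) :
    ∀ (as : List Int) (ss : List (List Int)),
      List.zipWith h (List.zipWith g as ss) ss = List.zipWith (fun a s => h (g a s) s) as ss := by
  intro as
  induction as with
  | nil => intro ss; simp
  | cons a as ih =>
    intro ss
    cases ss with
    | nil => simp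
    | cons s ss => simp [ih]

theorem zipWith_id (as : List Int) (ss : List (List Int)) (h : as.length = ss.length) :
    List.zipWith (fun a _ => a) as ss = as := by
  induction as generalizing ss with
  | nil => simp
  | cons a as ih =>
    cases ss with
    | nil => simp at h
    | cons s ss => simp at h; simp [ih _ h]

theorem zipWith_replicate_zero (h : List Int → Int) (ss : List (List Int)) :
    List.zipWith (fun a s => a + h s) (List.replicate ss.length (0 : Int)) ss
      = ss.map (fun s => 0 + h s) := by
  induction ss with
  | nil => simp
  | cons s ss ih => simp [List.replicate_succ, ih]

theorem take_len_append_cons {α : Type} (l1 : List α) (x : α) (l2 : List α) :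
    (l1 ++ x :: l2).take (l1.length + 1) = l1 ++ [x] := by
  induction l1 with
  | nil => simp
  | cons y ys ih => simp [ih]

theorem drop_len_append_cons {α : Type} (l1 : List α) (x : α) (l2 : List α) :
    (l1 ++ x :: l2).drop (l1.length + 1) = l2 := by
  induction l1 with
  | nil => simp
  | cons y ys ih => simp [ih]

theorem take_succ_getElem {α : Type} (l : List α) (n : Nat) (h : n < l.length) :
    l.take (n + 1) = l.take n ++ [l[n]] := by
  induction l generalizing n with
  | nil => simp at h
  | cons y ys ih =>
    cases n with
    | zero => simp
    | succ n =>
      have h' : n < ys.length := by simpa using h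
      simp only [List.take_succ_cons, List.getElem_cons_succ, List.cons_append]
      rw [ih n h']

-- A's inner loop adds cur to answer[j] exactly at the rows whose total equals k
theorem innerL (score : List (List Int)) (k cur : Int) :
    ∀ (m : Nat) (a : Int) (ans : List Int),
      a.toNat + m = score.length → 0 ≤ a → ans.length = score.length →
      (PySem.List.pyRange a (score.length : Int)).foldl (fun ans j =>
          if k = PySem.List.pyGetD (PySem.List.pyGetD score j []) 0 0 + PySem.List.pyGetD (PySem.List.pyGetD score j []) 1 0 then
            PySem.List.pySetD ans j (PySem.List.pyGetD ans j 0 + cur) else ans) ans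
        = ans.take a.toNat ++
            List.zipWith (fun x s => if k = PySem.List.pyGetD s 0 0 + PySem.List.pyGetD s 1 0 then x + cur else x)
              (ans.drop a.toNat) (score.drop a.toNat) := by
  intro m
  induction m with
  | zero =>
    intro a ans hm h0 hl
    have hrange : PySem.List.pyRange a (score.length : Int) = [] := by
      apply List.eq_nil_iff_forall_not_mem.mpr
      intro x hx
      rw [PySem.List.mem_pyRange_one] at hx
      omega
    have hdrop : score.drop a.toNat = [] := by
      apply List.drop_eq_nil_of_le; omega
    rw [hrange, hdrop]
    simp [List.take_of_length_le (by omega : ans.length ≤ a.toNat)]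
  | succ m ih =>
    intro a ans hm h0 hl
    have hab : a < (score.length : Int) := by omega
    rw [PySem.List.pyRange_one_cons hab]
    simp only [List.foldl_cons]
    have hna : a.toNat < ans.length := by omega
    have hna' : a.toNat < score.length := by omega
    have hget : PySem.List.pyGetD score a [] = score[a.toNat] :=
      PySem.List.pyGetD_eq_getElem score [] h0 (by omega)
    have hgetAns : PySem.List.pyGetD ans a 0 = ans[a.toNat]'hna :=
      PySem.List.pyGetD_eq_getElem ans 0 h0 (by omega)
    have hdropA : ans.drop a.toNat = ans[a.toNat] :: ans.drop (a.toNat + 1) :=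
      List.drop_eq_getElem_cons hna
    have hdropS : score.drop a.toNat = score[a.toNat] :: score.drop (a.toNat + 1) :=
      List.drop_eq_getElem_cons hna'
    have htklen : (ans.take a.toNat).length = a.toNat := by
      simp [List.length_take]; omega
    by_cases hk : k = (fun s => PySem.List.pyGetD s 0 0 + PySem.List.pyGetD s 1 0) score[a.toNat]
    · simp only at hk
      rw [hget, if_pos hk, PySem.List.pySetD_of_nonneg ans _ h0, hgetAns]
      have hset : ans.set a.toNat (ans[a.toNat] + cur)
          = ans.take a.toNat ++ (ans[a.toNat] + cur) :: ans.drop (a.toNat + 1) := by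
        rw [List.set_eq_take_append_cons_drop]; rw [if_pos hna]
      rw [hset]
      have hlen2 : (ans.take a.toNat ++ (ans[a.toNat] + cur) :: ans.drop (a.toNat + 1)).length
          = score.length := by
        simp; omega
      rw [ih (a + 1) _ (by omega) (by omega) hlen2]
      have hto : (a + 1).toNat = a.toNat + 1 := by omega
      rw [hto]
      have h1 := take_len_append_cons (ans.take a.toNat) (ans[a.toNat] + cur) (ans.drop (a.toNat + 1))
      have h2 := drop_len_append_cons (ans.take a.toNat) (ans[a.toNat] + cur) (ans.drop (a.toNat + 1))
      rw [htklen] at h1 h2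
      rw [h1, h2, hdropA, hdropS, List.zipWith_cons_cons, if_pos hk]
      simp
    · simp only at hk
      rw [hget, if_neg hk]
      rw [ih (a + 1) _ (by omega) (by omega) hl]
      have hto : (a + 1).toNat = a.toNat + 1 := by omega
      rw [hto, hdropA, hdropS]
      simp only [List.zipWith_cons_cons, if_neg hk]
      rw [take_succ_getElem ans a.toNat hna]
      simp only [List.append_assoc, List.singleton_append]

-- A's outer loop, over any (total, count) list, adds rk pointwise
theorem outerL (score : List (List Int)) :
    ∀ (L : List (Int × Int)) (ans : List Int) (cur : Int), ans.length = score.length →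
      (L.foldl (fun (st : List Int × Int) p =>
          ((PySem.List.pyRange 0 (score.length : Int)).foldl (fun ans j =>
              if p.1 = PySem.List.pyGetD (PySem.List.pyGetD score j []) 0 0 + PySem.List.pyGetD (PySem.List.pyGetD score j []) 1 0 then
                PySem.List.pySetD ans j (PySem.List.pyGetD ans j 0 + st.2) else ans) st.1,
           st.2 + p.2)) (ans, cur)).1
        = List.zipWith (fun a s => a + rk L cur (PySem.List.pyGetD s 0 0 + PySem.List.pyGetD s 1 0)) ans score := by
  intro L
  induction L with
  | nil =>
    intro ans cur hl
    simp only [List.foldl_nil, rk]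
    have h0 : (fun (a : Int) (s : List Int) => a + (0:Int)) = fun a _ => a := by
      funext a s; ring
    rw [h0, zipWith_id ans score hl]
  | cons p rest ih =>
    intro ans cur hl
    simp only [List.foldl_cons]
    have hinner := innerL score p.1 cur score.length 0 ans (by omega) (by omega) hl
    simp only [Int.toNat_zero, List.take_zero, List.drop_zero, List.nil_append] at hinner
    rw [hinner]
    have hlen : (List.zipWith (fun x s => if p.1 = PySem.List.pyGetD s 0 0 + PySem.List.pyGetD s 1 0 then x + cur else x) ans score).length
        = score.length := by simp [hl]
    rw [ih _ (cur + p.2) hlen]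
    rw [zipWith_zipWith]
    congr 1
    funext a s
    simp only [rk]
    split <;> ring

-- the zero-initialised answer list is a replicate
theorem answer0_eq (n : Nat) :
    (PySem.List.pyRange 0 (n : Int)).map (fun _ => (0 : Int)) = List.replicate n 0 := by
  rw [PySem.List.pyRange_zero_natCast, List.map_map]
  simp [List.eq_replicate_iff]

-- A's counting dict equals B's counting fold
theorem dictEq (score : List (List Int)) :
    score.foldl (fun (r : PySem.Dict Int Int) s =>
        if r.contains (PySem.List.pyGetD s 0 0 + PySem.List.pyGetD s 1 0) then
          r.insert (PySem.List.pyGetD s 0 0 + PySem.List.pyGetD s 1 0) (r.getD (PySem.List.pyGetD s 0 0 + PySem.List.pyGetD s 1 0) 0 + 1)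
        else r.insert (PySem.List.pyGetD s 0 0 + PySem.List.pyGetD s 1 0) 1) PySem.Dict.empty
      = (score.map (fun s => PySem.List.pyGetD s 0 0 + PySem.List.pyGetD s 1 0)).foldl (fun (d : PySem.Dict Int Int) t =>
          d.insert t (d.getD t 0 + 1)) PySem.Dict.empty := by
  rw [List.foldl_map]
  congr 1
  funext r s
  by_cases hc : r.contains (PySem.List.pyGetD s 0 0 + PySem.List.pyGetD s 1 0)
  · rw [if_pos hc]
  · rw [if_neg (by simp [hc])]
    rw [PySem.Dict.getD_of_not_contains r 0 (by simpa using hc)]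
    norm_num

-- B's rank-dict fold: looking up a key of L yields rk, other keys are untouched
theorem bfold :
    ∀ (L : List (Int × Int)), (L.map Prod.fst).Nodup →
    ∀ (d : PySem.Dict Int Int) (cur t : Int),
      ((L.foldl (fun (st : PySem.Dict Int Int × Int) p =>
          (st.1.insert p.1 st.2, st.2 + p.2)) (d, cur)).1).getD t 0
        = if t ∈ L.map Prod.fst then rk L cur t else d.getD t 0 := by
  intro L
  induction L with
  | nil => intro _ d cur t; simp
  | cons p rest ih =>
    intro hnd d cur t
    simp only [List.map_cons, List.nodup_cons] at hnd
    obtain ⟨hp, hrest⟩ := hnd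
    simp only [List.foldl_cons]
    rw [ih hrest (d.insert p.1 cur) (cur + p.2) t]
    rw [PySem.Dict.getD_insert]
    simp only [List.map_cons, List.mem_cons]
    by_cases hmem : t ∈ rest.map Prod.fst
    · have hne : ¬ (t = p.1) := by rintro rfl; exact hp hmem
      have hne' : ¬ (p.1 = t) := fun h => hne h.symm
      simp [hmem, hne, hne', rk]
    · by_cases het : t = p.1
      · subst het
        simp [hmem, rk, rk_not_mem rest (cur + p.2) p.1 hmem]
      · have hne' : ¬ (p.1 = t) := fun h => het h.symm
        simp [hmem, het]

-- every element of the counted list is a key of the counting dict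
theorem mem_keys_countfold (totals : List Int) (t : Int) (ht : t ∈ totals) :
    t ∈ (totals.foldl (fun (d : PySem.Dict Int Int) t =>
        d.insert t (d.getD t 0 + 1)) PySem.Dict.empty).keys := by
  rw [PySem.Dict.foldl_insert_getD_add_one_eq_counter, PySem.Dict.keys_counter,
    PySem.Set.mem_ofList]
  exact ht

theorem nodup_keys_countfold (totals : List Int) :
    (totals.foldl (fun (d : PySem.Dict Int Int) t =>
        d.insert t (d.getD t 0 + 1)) PySem.Dict.empty).keys.Nodup := by
  rw [PySem.Dict.foldl_insert_getD_add_one_eq_counter]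
  exact PySem.Dict.nodup_keys_counter totals

-- keys of a dict are the first components of its items
theorem keys_eq_map_fst (d : PySem.Dict Int Int) : d.keys = d.items.map Prod.fst := rfl

theorem solution_eq (score : List (List Int)) :
    solution score
      = score.map (fun s => rk (PySem.List.sorted2
          ((score.map (fun s => PySem.List.pyGetD s 0 0 + PySem.List.pyGetD s 1 0)).foldl (fun (d : PySem.Dict Int Int) t =>
            d.insert t (d.getD t 0 + 1)) PySem.Dict.empty).items
          (fun p => p.1) (fun p => p.2) true) 1 (PySem.List.pyGetD s 0 0 + PySem.List.pyGetD s 1 0)) := by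
  simp only [solution]
  rw [dictEq, answer0_eq]
  rw [outerL score _ _ 1 (by simp)]
  rw [zipWith_replicate_zero (fun s => rk (PySem.List.sorted2
      ((score.map (fun s => PySem.List.pyGetD s 0 0 + PySem.List.pyGetD s 1 0)).foldl (fun (d : PySem.Dict Int Int) t =>
        d.insert t (d.getD t 0 + 1)) PySem.Dict.empty).items
      (fun p => p.1) (fun p => p.2) true) 1 (PySem.List.pyGetD s 0 0 + PySem.List.pyGetD s 1 0)) score]
  simp

theorem solution_alt_eq (score : List (List Int)) :
    solution_alt score
      = score.map (fun s => rk (PySem.List.sorted2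
          ((score.map (fun s => PySem.List.pyGetD s 0 0 + PySem.List.pyGetD s 1 0)).foldl (fun (d : PySem.Dict Int Int) t =>
            d.insert t (d.getD t 0 + 1)) PySem.Dict.empty).items
          (fun p => p.1) (fun p => p.2) true) 1 (PySem.List.pyGetD s 0 0 + PySem.List.pyGetD s 1 0)) := by
  simp only [solution_alt]
  rw [List.map_map]
  apply List.map_congr_left
  intro s hs
  simp only [Function.comp]
  have hperm : ((PySem.List.sorted2
      ((score.map (fun s => PySem.List.pyGetD s 0 0 + PySem.List.pyGetD s 1 0)).foldl (fun (d : PySem.Dict Int Int) t =>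
        d.insert t (d.getD t 0 + 1)) PySem.Dict.empty).items
      (fun p => p.1) (fun p => p.2) true).map Prod.fst).Perm
      ((score.map (fun s => PySem.List.pyGetD s 0 0 + PySem.List.pyGetD s 1 0)).foldl (fun (d : PySem.Dict Int Int) t =>
        d.insert t (d.getD t 0 + 1)) PySem.Dict.empty).keys := by
    rw [keys_eq_map_fst]
    exact (PySem.List.sorted2_perm ((score.map (fun s => PySem.List.pyGetD s 0 0 + PySem.List.pyGetD s 1 0)).foldl (fun (d : PySem.Dict Int Int) t =>
        d.insert t (d.getD t 0 + 1)) PySem.Dict.empty).items (fun p => p.1) (fun p => p.2) true).map Prod.fst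
  have hnd := hperm.nodup_iff.mpr (nodup_keys_countfold (score.map (fun s => PySem.List.pyGetD s 0 0 + PySem.List.pyGetD s 1 0)))
  rw [bfold _ hnd PySem.Dict.empty 1 (PySem.List.pyGetD s 0 0 + PySem.List.pyGetD s 1 0)]
  rw [if_pos]
  rw [hperm.mem_iff]
  exact mem_keys_countfold _ _ (List.mem_map_of_mem hs)

-- ===== VERDICT (by name: the statement is the Claim_ definition above) =====
theorem solution_spec : Claim_equal_solution := by
  intro score _ _
  unfold Spec_solution
  rw [solution_eq, solution_alt_eq]
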